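-- pv_equiv track=rewrite | github.com/nadiein/programming-lessons | 14.03.2023/py/main.py | choose_best_sum_one
-- ===== SOURCE A (Python) =====
-- import itertools
--
-- def choose_best_sum_one(t, k, ls):
--     best_sum = None
--
--     # Generate all combinations of k towns from the list of distances
--     for towns in itertools.combinations(ls, k):
--         total_distance = sum(towns)
--
--         # If the total distance is less than or equal to the limit and
--         # it's greater than the current best sum, update the best sum
--         if total_distance <= t and (best_sum is None or total_distance > best_sum):
--             best_sum = total_distance
--
--     # If no valid sum was found, return None
--     if best_sum is None:
--         return None
--
--     return best_sum
-- ===== SOURCE B (Python) =====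
-- def choose_best_sum_one(t, k, ls):
--     # Exact-k subset-sum DP over the smaller of k and n-k: dp[j] is the set of
--     # sums achievable with exactly j towns; for large k work with the complement.
--     n = len(ls)
--     if k < 0 or k > n:
--         return None
--     m = min(k, n - k)
--     dp = [{0}] + [set() for _ in range(m)]
--     for x in ls:
--         dp = [dp[0]] + [b | {s + x for s in a} for a, b in zip(dp, dp[1:])]
--     if 2 * k <= n:
--         cands = [s for s in dp[m] if s <= t]
--         return max(cands) if cands else None
--     total = sum(ls)
--     cands = [s for s in dp[m] if s >= total - t]
--     return total - min(cands) if cands else None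
-- ===== Notes on version B (the rewrite author's own statement) =====
-- stated objective: alternative
-- what changed: Replaces enumeration of all C(n,k) combinations with an exactly-min(k,n-k)-item subset-sum dynamic program over sets of reachable sums (using the complement when k > n/2), then picks the best reachable sum within the limit.
import Mathlib
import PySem

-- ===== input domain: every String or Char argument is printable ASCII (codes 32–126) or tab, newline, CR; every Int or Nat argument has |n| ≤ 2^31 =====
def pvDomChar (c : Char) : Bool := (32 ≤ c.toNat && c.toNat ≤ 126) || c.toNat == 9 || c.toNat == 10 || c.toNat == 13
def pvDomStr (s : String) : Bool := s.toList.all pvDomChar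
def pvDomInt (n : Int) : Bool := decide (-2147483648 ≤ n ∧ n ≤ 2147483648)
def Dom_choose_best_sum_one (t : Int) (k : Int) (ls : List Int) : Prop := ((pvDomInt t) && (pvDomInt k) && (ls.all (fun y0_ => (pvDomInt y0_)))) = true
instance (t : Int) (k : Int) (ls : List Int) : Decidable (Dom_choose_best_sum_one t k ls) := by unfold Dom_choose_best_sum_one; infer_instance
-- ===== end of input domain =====

-- B replaces A's enumeration of all C(n,k) combinations by an exactly-min(k,n-k)-item
-- subset-sum DP over sets of reachable sums (objective: alternative); equal return values
-- are proved for k ≥ 0.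


-- ===== PORT A =====
-- itertools.combinations(ls, j): all j-element subsequences, in order
def pvCombos (j : Nat) (xs : List Int) : List (List Int) :=
  match j, xs with
  | 0, _ => [[]]
  | _ + 1, [] => []
  | j + 1, x :: rest => ((pvCombos j rest).map (fun c => x :: c)) ++ pvCombos (j + 1) rest

def choose_best_sum_one (t : Int) (k : Int) (ls : List Int) : Option Int :=
  (pvCombos k.toNat ls).foldl (fun best towns =>
    let total := towns.sum
    match best with
    | none => if total ≤ t then some total else none
    | some b => if total ≤ t ∧ total > b then some total else some b) none

-- ===== PORT B =====
-- one pass of 'dp = [dp[0]] + [b | {s + x for s in a} for a, b in zip(dp, dp[1:])]'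
def pvStep (x : Int) (dp : List (PySem.Set Int)) : List (PySem.Set Int) :=
  PySem.List.pyGetD dp 0 PySem.Set.empty ::
    (dp.zip (PySem.List.slice dp (some 1) none)).map
      (fun ab => PySem.Set.union ab.2 (PySem.Set.ofList (ab.1.map (fun s => s + x))))

def choose_best_sum_one_alt (t : Int) (k : Int) (ls : List Int) : Option Int :=
  if k < 0 ∨ (ls.length : Int) < k then none
  else
    let m : Int := min k ((ls.length : Int) - k)
    let dp := ls.foldl (fun dp x => pvStep x dp)
      (PySem.Set.ofList [0] :: List.replicate m.toNat PySem.Set.empty)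
    -- dp[m]: index in range since every pvStep preserves the length m+1
    if 2 * k ≤ (ls.length : Int) then
      let cands := (PySem.List.pyGetD dp m PySem.Set.empty).filter (fun s => decide (s ≤ t))
      if cands = [] then none else PySem.List.max? cands (fun y => y)
    else
      let total := ls.sum
      let cands := (PySem.List.pyGetD dp m PySem.Set.empty).filter (fun s => decide (total - t ≤ s))
      if cands = [] then none else (PySem.List.min? cands (fun y => y)).map (fun mn => total - mn)

-- ===== PRECONDITION & SPEC =====
-- Pre_ excludes k < 0, where A's itertools.combinations raises ValueError.
def Pre_choose_best_sum_one (t : Int) (k : Int) (ls : List Int) : Prop := 0 ≤ k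
instance (t : Int) (k : Int) (ls : List Int) : Decidable (Pre_choose_best_sum_one t k ls) := by unfold Pre_choose_best_sum_one; infer_instance
def pvWitness_choose_best_sum_one : Int × Int × List Int := (10, 2, [3, 4, 5])

def Spec_choose_best_sum_one (t : Int) (k : Int) (ls : List Int) (out : Option Int) : Prop := out = choose_best_sum_one_alt t k ls
instance (t : Int) (k : Int) (ls : List Int) (out : Option Int) : Decidable (Spec_choose_best_sum_one t k ls out) := by unfold Spec_choose_best_sum_one; infer_instance

-- ===== CLAIM (what is proved, stated in full; the proofs are below) =====
def Claim_equal_choose_best_sum_one : Prop := ∀ (t : Int) (k : Int) (ls : List Int), Dom_choose_best_sum_one t k ls → Pre_choose_best_sum_one t k ls → Spec_choose_best_sum_one t k ls (choose_best_sum_one t k ls)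

-- ===== LEMMAS AND PROOFS =====

-- s is the sum of some j-element subsequence of xs
def pvAch (j : Nat) (xs : List Int) (s : Int) : Prop :=
  ∃ c : List Int, c.Sublist xs ∧ c.length = j ∧ c.sum = s

theorem pvAch_zero (xs : List Int) (s : Int) : pvAch 0 xs s ↔ s = 0 := by
  constructor
  · rintro ⟨c, -, hl, hs⟩
    rw [List.length_eq_zero_iff] at hl; subst hl; simpa using hs.symm
  · rintro rfl; exact ⟨[], List.nil_sublist xs, rfl, rfl⟩

theorem pvAch_nil (j : Nat) (s : Int) : pvAch (j + 1) [] s ↔ False := by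
  simp only [iff_false]
  rintro ⟨c, hsub, hl, -⟩
  rw [List.sublist_nil] at hsub; subst hsub; simp at hl

theorem mem_sums_pvCombos (xs : List Int) : ∀ (j : Nat) (s : Int),
    s ∈ (pvCombos j xs).map List.sum ↔ pvAch j xs s := by
  induction xs with
  | nil =>
    intro j s
    cases j with
    | zero => simp [pvCombos, pvAch_zero]
    | succ j => simp [pvCombos, pvAch_nil]
  | cons x rest ih =>
    intro j s
    cases j with
    | zero => simp [pvCombos, pvAch_zero]
    | succ j =>
      simp only [pvCombos, List.map_append, List.mem_append, List.map_map, List.mem_map,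
        Function.comp]
      constructor
      · rintro (⟨c, hc, rfl⟩ | h)
        · obtain ⟨c', hsub, hl, hs⟩ := (ih j c.sum).mp (List.mem_map_of_mem hc)
          exact ⟨x :: c', hsub.cons₂ x, by simp [hl], by simp [hs]⟩
        · obtain ⟨a, ha, rfl⟩ := h
          obtain ⟨c', hsub, hl, hs⟩ := (ih (j + 1) a.sum).mp (List.mem_map_of_mem ha)
          exact ⟨c', hsub.cons x, hl, hs⟩
      · rintro ⟨c, hsub, hl, hs⟩
        rcases List.sublist_cons_iff.mp hsub with h | ⟨r, rfl, hr⟩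
        · obtain ⟨a, ha, hsum⟩ := List.mem_map.mp ((ih (j + 1) s).mpr ⟨c, h, hl, hs⟩)
          exact Or.inr ⟨a, ha, hsum⟩
        · left
          have : pvAch j rest r.sum := ⟨r, hr, by simpa using hl, rfl⟩
          obtain ⟨c₂, hc₂, hs₂⟩ := List.mem_map.mp ((ih j r.sum).mpr this)
          exact ⟨c₂, hc₂, by simp at hs ⊢; omega⟩

theorem pvAch_snoc (j : Nat) (ys : List Int) (x s : Int) :
    pvAch j (ys ++ [x]) s ↔ pvAch j ys s ∨ ∃ i, j = i + 1 ∧ ∃ s', pvAch i ys s' ∧ s = s' + x := by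
  constructor
  · rintro ⟨c, hsub, hl, hs⟩
    obtain ⟨r1, r2, rfl, h1, h2⟩ := List.sublist_append_iff.mp hsub
    rcases List.sublist_singleton.mp h2 with rfl | rfl
    · exact Or.inl ⟨r1, h1, by simpa using hl, by simpa using hs⟩
    · refine Or.inr ⟨r1.length, by simpa using hl.symm, r1.sum, ⟨r1, h1, rfl, rfl⟩, ?_⟩
      simp at hs; omega
  · rintro (⟨c, hsub, hl, hs⟩ | ⟨i, rfl, s', ⟨c, hsub, hl, hs⟩, rfl⟩)
    · exact ⟨c, hsub.trans (List.sublist_append_left ys [x]), hl, hs⟩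
    · exact ⟨c ++ [x], hsub.append (List.Sublist.refl [x]), by simp [hl], by simp [hs]⟩

theorem pvCombos_nil_of_lt : ∀ (xs : List Int) (j : Nat), xs.length < j → pvCombos j xs = [] := by
  intro xs
  induction xs with
  | nil => intro j h; cases j with | zero => omega | succ j => rfl
  | cons x rest ih =>
    intro j h
    cases j with
    | zero => omega
    | succ j =>
      simp at h
      simp [pvCombos, ih j (by omega), ih (j + 1) (by omega)]

def pvInv (K : Nat) (p : List Int) (dp : List (PySem.Set Int)) : Prop :=
  dp.length = K + 1 ∧ ∀ (j : Nat) (h : j < dp.length) (s : Int), s ∈ dp[j] ↔ pvAch j p s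

theorem pvInv_init (K : Nat) :
    pvInv K [] (PySem.Set.ofList [0] :: List.replicate K PySem.Set.empty) := by
  constructor
  · simp
  · intro j hj s
    cases j with
    | zero =>
      simp only [List.getElem_cons_zero]
      rw [pvAch_zero]
      constructor
      · intro h; simpa using (PySem.Set.mem_ofList [0] s).mp h
      · rintro rfl; exact (PySem.Set.mem_ofList [0] 0).mpr (by simp)
    | succ j =>
      simp only [List.getElem_cons_succ]
      simp at hj
      rw [List.getElem_replicate, pvAch_nil]
      simp [PySem.Set.empty]

theorem pvStep_inv (K : Nat) (p : List Int) (dp : List (PySem.Set Int)) (x : Int)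
    (h : pvInv K p dp) : pvInv K (p ++ [x]) (pvStep x dp) := by
  obtain ⟨hlen, hmem⟩ := h
  cases dp with
  | nil => simp at hlen
  | cons d0 rest =>
    simp only [pvStep, PySem.List.slice_from_one, List.tail_cons, PySem.List.pyGetD_zero_cons]
    have hrl : rest.length = K := by simpa using hlen
    constructor
    · simp [hrl]
    · intro j hj s
      cases j with
      | zero =>
        simp only [List.getElem_cons_zero]
        have h0 := hmem 0 (by simp) s
        simp only [List.getElem_cons_zero] at h0
        rw [h0, pvAch_zero, pvAch_zero]
      | succ j =>
        have hjr : j < rest.length := by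
          simp [List.length_zip, hrl] at hj ⊢; omega
        have hj1 : j + 1 < (d0 :: rest).length := by simp; omega
        simp only [List.getElem_cons_succ, List.getElem_map, List.getElem_zip]
        rw [pvAch_snoc]
        have hz : (rest[j]) = (d0 :: rest)[j + 1] := rfl
        constructor
        · intro hmem'
          rcases (PySem.Set.mem_union _ _ s).mp hmem' with hin | hin
          · rw [hz] at hin
            exact Or.inl ((hmem (j + 1) hj1 s).mp hin)
          · obtain ⟨s', hs', hseq⟩ := List.mem_map.mp ((PySem.Set.mem_ofList _ s).mp hin)
            have hjlt : j < (d0 :: rest).length := by simp; omega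
            exact Or.inr ⟨j, rfl, s', (hmem j hjlt s').mp hs', hseq.symm⟩
        · intro hor
          rcases hor with hach | ⟨i, hi, s', hach, hseq⟩
          · refine (PySem.Set.mem_union _ _ s).mpr (Or.inl ?_)
            rw [hz]
            exact (hmem (j + 1) hj1 s).mpr hach
          · have hach' : pvAch j p s' := by
              rwa [show i = j by omega] at hach
            have hjlt : j < (d0 :: rest).length := by simp; omega
            refine (PySem.Set.mem_union _ _ _).mpr (Or.inr ?_)
            exact (PySem.Set.mem_ofList _ _).mpr (List.mem_map.mpr ⟨s', (hmem j hjlt s').mpr hach', hseq.symm⟩)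

theorem pvFold_inv (K : Nat) : ∀ (xs p : List Int) (dp : List (PySem.Set Int)),
    pvInv K p dp → pvInv K (p ++ xs) (xs.foldl (fun dp x => pvStep x dp) dp) := by
  intro xs
  induction xs with
  | nil => intro p dp h; simpa using h
  | cons x xs ih =>
    intro p dp h
    have h2 := ih (p ++ [x]) (pvStep x dp) (pvStep_inv K p dp x h)
    simpa using h2

def pvOmax (o : Option Int) (s : Int) : Option Int := some (o.elim s (fun a => max a s))

theorem pvFoldA_eq (t : Int) : ∀ (C : List (List Int)) (b : Option Int),
    C.foldl (fun best towns => match best with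
      | none => if towns.sum ≤ t then some towns.sum else none
      | some b' => if towns.sum ≤ t ∧ towns.sum > b' then some towns.sum else some b') b
    = ((C.map List.sum).filter (fun s => decide (s ≤ t))).foldl pvOmax b := by
  intro C
  induction C with
  | nil => intro b; rfl
  | cons c C ih =>
    intro b
    by_cases hs : c.sum ≤ t
    · rw [List.map_cons, List.foldl_cons, List.filter_cons_of_pos (by simpa using hs),
        List.foldl_cons, ih]
      congr 1
      cases b with
      | none => simp [pvOmax, hs]
      | some a =>
        simp only [pvOmax, Option.elim]
        by_cases h : c.sum ≤ a
        · rw [if_neg (by omega), max_eq_left h]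
        · rw [if_pos ⟨hs, by omega⟩, max_eq_right (by omega)]
    · rw [List.map_cons, List.filter_cons_of_neg (by simpa using hs), List.foldl_cons, ih]
      congr 1
      cases b with
      | none => simp [hs]
      | some a => simp [hs]

theorem pvFoldl_omax_some : ∀ (L : List Int) (a : Int), L.foldl pvOmax (some a) = some (L.foldl max a) := by
  intro L
  induction L with
  | nil => intro a; rfl
  | cons x L ih => intro a; simp only [List.foldl_cons, pvOmax, Option.elim]; exact ih (max a x)

theorem pvFoldl_omax_eq_max? (L : List Int) :
    L.foldl pvOmax none = PySem.List.max? L (fun y => y) := by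
  cases L with
  | nil => exact ((PySem.List.max?_eq_none_iff [] (fun y => y)).mpr rfl).symm
  | cons x L =>
    rw [PySem.List.max?_id_cons, List.foldl_cons]
    show L.foldl pvOmax (some x) = _
    exact pvFoldl_omax_some L x

theorem pvMax?_congr (L1 L2 : List Int) (h : ∀ x, x ∈ L1 ↔ x ∈ L2) :
    PySem.List.max? L1 (fun y => y) = PySem.List.max? L2 (fun y => y) := by
  cases h1 : PySem.List.max? L1 (fun y => y) with
  | none =>
    have : L1 = [] := (PySem.List.max?_eq_none_iff L1 (fun y => y)).mp h1
    subst this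
    cases h2 : PySem.List.max? L2 (fun y => y) with
    | none => rfl
    | some m => exact absurd ((h m).mpr (PySem.List.max?_mem h2)) (by simp)
  | some m =>
    cases h2 : PySem.List.max? L2 (fun y => y) with
    | none =>
      have : L2 = [] := (PySem.List.max?_eq_none_iff L2 (fun y => y)).mp h2
      subst this
      exact absurd ((h m).mp (PySem.List.max?_mem h1)) (by simp)
    | some m' =>
      have hm : m ≤ m' := PySem.List.max?_isMax h2 m ((h m).mp (PySem.List.max?_mem h1))
      have hm' : m' ≤ m := PySem.List.max?_isMax h1 m' ((h m').mpr (PySem.List.max?_mem h2))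
      rw [le_antisymm hm hm']

theorem pvAch_compl : ∀ (xs : List Int) (j : Nat) (s : Int),
    pvAch j xs s → pvAch (xs.length - j) xs (xs.sum - s) := by
  intro xs
  induction xs with
  | nil =>
    rintro j s ⟨c, hsub, hl, hs⟩
    rw [List.sublist_nil] at hsub; subst hsub
    exact ⟨[], List.Sublist.refl [], by simp [← hl], by simp [← hs]⟩
  | cons x xs ih =>
    rintro j s ⟨c, hsub, hl, hs⟩
    have hjle : j ≤ (x :: xs).length := by rw [← hl]; exact hsub.length_le
    rcases List.sublist_cons_iff.mp hsub with h | ⟨r, rfl, hr⟩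
    · have hj : j ≤ xs.length := by rw [← hl]; exact h.length_le
      obtain ⟨c', hsub', hl', hs'⟩ := ih j s ⟨c, h, hl, hs⟩
      refine ⟨x :: c', hsub'.cons₂ x, by simp [hl']; omega, by simp [hs']; ring⟩
    · have hjr : r.length + 1 = j := by simpa using hl
      have hsr : x + r.sum = s := by simpa using hs
      obtain ⟨c', hsub', hl', hs'⟩ := ih r.length r.sum ⟨r, hr, rfl, rfl⟩
      have hrl : r.length ≤ xs.length := hr.length_le
      refine ⟨c', hsub'.cons x, by simp [hl']; omega, by rw [hs']; simp; ring_nf; omega⟩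

theorem pvAch_compl_iff (xs : List Int) (j : Nat) (hj : j ≤ xs.length) (s : Int) :
    pvAch j xs s ↔ pvAch (xs.length - j) xs (xs.sum - s) := by
  constructor
  · exact pvAch_compl xs j s
  · intro h
    have h2 := pvAch_compl xs (xs.length - j) (xs.sum - s) h
    rw [show xs.length - (xs.length - j) = j from by omega,
      show xs.sum - (xs.sum - s) = s from by ring] at h2
    exact h2

theorem pvMin?_reflect (L1 L2 : List Int) (total : Int)
    (h : ∀ x : Int, x ∈ L1 ↔ total - x ∈ L2) :
    PySem.List.max? L1 (fun y => y) = (PySem.List.min? L2 (fun y => y)).map (fun mn => total - mn) := by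
  have h' : ∀ y ∈ L2, total - y ∈ L1 := by
    intro y hy
    exact (h (total - y)).mpr (by rwa [sub_sub_cancel])
  cases h1 : PySem.List.max? L1 (fun y => y) with
  | none =>
    have hL1 : L1 = [] := (PySem.List.max?_eq_none_iff L1 (fun y => y)).mp h1
    cases h2 : PySem.List.min? L2 (fun y => y) with
    | none => rfl
    | some mn => exact absurd (h' mn (PySem.List.min?_mem h2)) (by simp [hL1])
  | some M =>
    cases h2 : PySem.List.min? L2 (fun y => y) with
    | none =>
      have hL2 : L2 = [] := (PySem.List.min?_eq_none_iff L2 (fun y => y)).mp h2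
      exact absurd ((h M).mp (PySem.List.max?_mem h1)) (by simp [hL2])
    | some mn =>
      have hMem : total - M ∈ L2 := (h M).mp (PySem.List.max?_mem h1)
      have hle1 : mn ≤ total - M := PySem.List.min?_isMin h2 _ hMem
      have hle2 : total - mn ≤ M := PySem.List.max?_isMax h1 _ (h' mn (PySem.List.min?_mem h2))
      simp only [Option.map_some]
      congr 1
      omega

theorem choose_best_sum_one_spec : Claim_equal_choose_best_sum_one := by
  intro t k ls _ hpre
  have hk0 : (0 : Int) ≤ k := hpre
  unfold Spec_choose_best_sum_one
  by_cases hk : (ls.length : Int) < k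
  · have hbig : ls.length < k.toNat := by omega
    simp only [choose_best_sum_one, choose_best_sum_one_alt]
    rw [pvCombos_nil_of_lt ls k.toNat hbig, if_pos (Or.inr hk)]
    rfl
  · simp only [choose_best_sum_one, choose_best_sum_one_alt,
      if_neg (by omega : ¬(k < 0 ∨ (ls.length : Int) < k))]
    rw [pvFoldA_eq, pvFoldl_omax_eq_max?]
    set m : Int := min k ((ls.length : Int) - k) with hmdef
    have hm0 : 0 ≤ m := le_min hk0 (by omega)
    have hmk_le : m ≤ k := min_le_left _ _
    have hInv := pvFold_inv m.toNat ls [] _ (pvInv_init m.toNat)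
    simp only [List.nil_append] at hInv
    clear_value m
    set dp := ls.foldl (fun dp x => pvStep x dp)
      (PySem.Set.ofList [0] :: List.replicate m.toNat PySem.Set.empty) with hdp
    obtain ⟨hlen, hmem⟩ := hInv
    have hget : PySem.List.pyGetD dp m PySem.Set.empty = dp[m.toNat]'(by omega) :=
      PySem.List.pyGetD_eq_getElem dp PySem.Set.empty hm0 (by rw [hlen]; omega)
    rw [hget]
    by_cases h2k : 2 * k ≤ (ls.length : Int)
    · rw [if_pos h2k]
      have hmk : m = k := by rw [hmdef]; exact min_eq_left (by omega)
      have hmkn : m.toNat = k.toNat := by rw [hmk]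
      have hmemiff : ∀ x : Int,
          x ∈ ((pvCombos k.toNat ls).map List.sum).filter (fun s => decide (s ≤ t)) ↔
          x ∈ (dp[m.toNat]'(by omega)).filter (fun s => decide (s ≤ t)) := by
        intro x
        simp only [List.mem_filter, and_congr_left_iff]
        intro _
        rw [mem_sums_pvCombos, hmem m.toNat (by omega) x, hmkn]
      rw [pvMax?_congr _ _ hmemiff]
      cases hc : (dp[m.toNat]'(by omega)).filter (fun s => decide (s ≤ t)) with
      | nil => rw [if_pos rfl]; exact (PySem.List.max?_eq_none_iff [] (fun y => y)).mpr rfl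
      | cons a l => rw [if_neg (by simp)]
    · rw [if_neg h2k]
      have hmk : m = (ls.length : Int) - k := by rw [hmdef]; exact min_eq_right (by omega)
      have hK : m.toNat = ls.length - k.toNat := by rw [hmk]; omega
      have hkn : k.toNat ≤ ls.length := by omega
      have href : ∀ x : Int,
          x ∈ ((pvCombos k.toNat ls).map List.sum).filter (fun s => decide (s ≤ t)) ↔
          ls.sum - x ∈ (dp[m.toNat]'(by omega)).filter (fun s => decide (ls.sum - t ≤ s)) := by
        intro x
        simp only [List.mem_filter, decide_eq_true_eq]
        constructor
        · rintro ⟨hx, hxt⟩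
          refine ⟨?_, by omega⟩
          rw [mem_sums_pvCombos] at hx
          refine (hmem m.toNat (by omega) _).mpr ?_
          rw [hK]
          exact pvAch_compl ls k.toNat x hx
        · rintro ⟨hx, hxt⟩
          refine ⟨?_, by omega⟩
          rw [mem_sums_pvCombos]
          have h3 := (hmem m.toNat (by omega) _).mp hx
          rw [hK] at h3
          exact (pvAch_compl_iff ls k.toNat hkn x).mpr h3
      rw [pvMin?_reflect _ _ ls.sum href]
      cases hc : (dp[m.toNat]'(by omega)).filter (fun s => decide (ls.sum - t ≤ s)) with
      | nil =>
        rw [if_pos rfl, (PySem.List.min?_eq_none_iff ([] : List Int) (fun y => y)).mpr rfl]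
        rfl
      | cons a l => rw [if_neg (by simp)]
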